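-- pv_equiv track=rewrite | github.com/ICESAT-2HackWeek/EverythingAnyWhereAllAtOnce | contributors/liuzheng/is2kml.py | find_sect
-- ===== SOURCE A (Python) =====
-- def find_sect(txt_tag,dat,i_start,i_end):
--     '''
--     Search the ascii lines to find start and end line number
--     using txt_tag with '<' and '/>'.
--     '''
--     i0 = -1; i1 = -1
--     flg0 = False; flg1 = False
--     for iln in range(i_start,i_end+1):
--         tline = dat[iln].lstrip().rstrip()
--         if '<'+txt_tag  in tline and not flg0:
--             i0 = iln; flg0 = True
--         if '/'+txt_tag+'>' in tline and not flg1: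
--             i1 = iln; flg1 = True
--         if flg0 and flg1:
--             break
--     return i0, i1
-- ===== SOURCE B (Python) =====
-- def find_sect(txt_tag, dat, i_start, i_end):
--     '''Two independent first-match searches over the same inclusive range.'''
--     start = '<' + txt_tag
--     end = '/' + txt_tag + '>'
--     rng = range(i_start, i_end + 1)
--     i0 = next((i for i in rng if start in dat[i].strip()), -1)
--     i1 = next((i for i in rng if end in dat[i].strip()), -1)
--     return i0, i1
-- ===== Notes on version B (the rewrite author's own statement) =====
-- stated objective: simpler
-- what changed: Replaces the fused flag-driven loop (two booleans, combined early break) by two independent first-match searches for the start tag and the end tag over the same inclusive range; Pre_ excludes exactly the inputs where Python raises IndexError (an index outside dat reached before both tags are found).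
import Mathlib
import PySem

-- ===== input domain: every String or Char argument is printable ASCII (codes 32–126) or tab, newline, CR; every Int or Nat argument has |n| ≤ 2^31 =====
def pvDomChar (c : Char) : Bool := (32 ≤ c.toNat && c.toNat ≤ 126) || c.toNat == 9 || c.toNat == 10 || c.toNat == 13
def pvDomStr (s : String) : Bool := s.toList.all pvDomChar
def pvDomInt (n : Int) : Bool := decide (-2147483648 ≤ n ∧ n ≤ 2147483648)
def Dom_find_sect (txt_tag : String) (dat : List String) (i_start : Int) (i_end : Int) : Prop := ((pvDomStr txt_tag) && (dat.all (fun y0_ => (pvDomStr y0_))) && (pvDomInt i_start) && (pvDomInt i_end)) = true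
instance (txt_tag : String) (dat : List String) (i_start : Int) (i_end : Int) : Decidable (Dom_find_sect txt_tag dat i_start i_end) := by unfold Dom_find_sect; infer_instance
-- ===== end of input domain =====

-- B replaces A's fused flag-driven loop with early break by two independent first-match
-- searches (one per tag) over the same inclusive index range; objective: simpler.


-- ===== PORT A =====
-- the loop body: i0/i1 and the two flags threaded through the range, with the combined break
def find_sect_go (st en : String) (dat : List String) :
    List Int → Int → Int → Bool → Bool → Int × Int
  | [], i0, i1, _, _ => (i0, i1)
  | iln :: rest, i0, i1, flg0, flg1 =>
      -- dat[iln].lstrip().rstrip(); index is always in range on Pre_ inputs, getD "" is a dummy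
      let tline := PySem.Str.rstrip (PySem.Str.lstrip ((PySem.List.pyGet? dat iln).getD ""))
      let i0' := if PySem.Str.isIn st tline && !flg0 then iln else i0
      let flg0' := if PySem.Str.isIn st tline && !flg0 then true else flg0
      let i1' := if PySem.Str.isIn en tline && !flg1 then iln else i1
      let flg1' := if PySem.Str.isIn en tline && !flg1 then true else flg1
      if flg0' && flg1' then (i0', i1')
      else find_sect_go st en dat rest i0' i1' flg0' flg1'

def find_sect (txt_tag : String) (dat : List String) (i_start : Int) (i_end : Int) : Int × Int :=
  find_sect_go ("<" ++ txt_tag) ("/" ++ txt_tag ++ ">") dat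
    (PySem.List.pyRange i_start (i_end + 1) 1) (-1) (-1) false false

-- ===== PORT B =====
-- next((i for i in rng if tag in dat[i].strip()), -1)
def firstIdx (tag : String) (dat : List String) : List Int → Int
  | [] => -1
  | i :: rest =>
      if PySem.Str.isIn tag (PySem.Str.strip ((PySem.List.pyGet? dat i).getD "")) then i
      else firstIdx tag dat rest

def find_sect_alt (txt_tag : String) (dat : List String) (i_start : Int) (i_end : Int) : Int × Int :=
  let start := "<" ++ txt_tag
  let en := "/" ++ txt_tag ++ ">"
  let rng := PySem.List.pyRange i_start (i_end + 1) 1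
  (firstIdx start dat rng, firstIdx en dat rng)

-- ===== PRECONDITION & SPEC =====
-- Pre_ excludes exactly the inputs on which Python's A raises IndexError: a nonempty range
-- that starts below -len(dat), or one that runs past the end of dat without both tags having
-- been found at valid indices first (the early break).  Both A and B raise on all of these.
def Pre_find_sect (txt_tag : String) (dat : List String) (i_start : Int) (i_end : Int) : Prop :=
  i_end < i_start ∨
  (-(dat.length : Int) ≤ i_start ∧
    (i_end < (dat.length : Int) ∨
      ((∃ i ∈ PySem.List.pyRange i_start (dat.length : Int) 1,
          PySem.Str.isIn ("<" ++ txt_tag)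
            (PySem.Str.strip ((PySem.List.pyGet? dat i).getD "")) = true) ∧
       (∃ i ∈ PySem.List.pyRange i_start (dat.length : Int) 1,
          PySem.Str.isIn ("/" ++ txt_tag ++ ">")
            (PySem.Str.strip ((PySem.List.pyGet? dat i).getD "")) = true))))
instance (txt_tag : String) (dat : List String) (i_start : Int) (i_end : Int) : Decidable (Pre_find_sect txt_tag dat i_start i_end) := by unfold Pre_find_sect; infer_instance

def pvWitness_find_sect : String × List String × Int × Int := ("tag", ["a", " <tag> ", "x", "</tag>"], 0, 3)

def Spec_find_sect (txt_tag : String) (dat : List String) (i_start : Int) (i_end : Int) (out : Int × Int) : Prop := out = find_sect_alt txt_tag dat i_start i_end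
instance (txt_tag : String) (dat : List String) (i_start : Int) (i_end : Int) (out : Int × Int) : Decidable (Spec_find_sect txt_tag dat i_start i_end out) := by unfold Spec_find_sect; infer_instance

-- ===== CLAIM (what is proved, stated in full; the proofs are below) =====
def Claim_equal_find_sect : Prop := ∀ (txt_tag : String) (dat : List String) (i_start : Int) (i_end : Int), Dom_find_sect txt_tag dat i_start i_end → Pre_find_sect txt_tag dat i_start i_end → Spec_find_sect txt_tag dat i_start i_end (find_sect txt_tag dat i_start i_end)

-- ===== LEMMAS AND PROOFS =====

-- the two "strip" spellings coincide: s.lstrip().rstrip() = s.strip()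
theorem strip_decomp (s : String) :
    PySem.Str.rstrip (PySem.Str.lstrip s) = PySem.Str.strip s := by
  simp [PySem.Str.rstrip, PySem.Str.lstrip, PySem.Str.strip, PySem.Chars.strip]

-- once flg0 is set with value i0, the rest of A's loop is the first-match search for the end tag
theorem go_true_false (st en : String) (dat : List String) :
    ∀ (rng : List Int) (i0 : Int),
      find_sect_go st en dat rng i0 (-1) true false = (i0, firstIdx en dat rng) := by
  intro rng
  induction rng with
  | nil => intro i0; simp [find_sect_go, firstIdx]
  | cons iln rest ih =>
      intro i0
      simp only [find_sect_go, firstIdx, strip_decomp]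
      by_cases h : PySem.Chars.isIn en.toList (PySem.Chars.strip ((PySem.List.pyGet? dat iln).getD "").toList) = true
      · simp [h]
      · simp [h, ih]

-- symmetric: flg1 set, still searching for the start tag
theorem go_false_true (st en : String) (dat : List String) :
    ∀ (rng : List Int) (i1 : Int),
      find_sect_go st en dat rng (-1) i1 false true = (firstIdx st dat rng, i1) := by
  intro rng
  induction rng with
  | nil => intro i1; simp [find_sect_go, firstIdx]
  | cons iln rest ih =>
      intro i1
      simp only [find_sect_go, firstIdx, strip_decomp]
      by_cases h : PySem.Chars.isIn st.toList (PySem.Chars.strip ((PySem.List.pyGet? dat iln).getD "").toList) = true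
      · simp [h]
      · simp [h, ih]

-- main invariant: A's fused loop computes the two independent first matches
theorem go_false_false (st en : String) (dat : List String) :
    ∀ (rng : List Int),
      find_sect_go st en dat rng (-1) (-1) false false =
        (firstIdx st dat rng, firstIdx en dat rng) := by
  intro rng
  induction rng with
  | nil => simp [find_sect_go, firstIdx]
  | cons iln rest ih =>
      simp only [find_sect_go, firstIdx, strip_decomp]
      by_cases h0 : PySem.Chars.isIn st.toList (PySem.Chars.strip ((PySem.List.pyGet? dat iln).getD "").toList) = true
      · by_cases h1 : PySem.Chars.isIn en.toList (PySem.Chars.strip ((PySem.List.pyGet? dat iln).getD "").toList) = true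
        · simp [h0, h1]
        · simp [h0, h1, go_true_false]
      · by_cases h1 : PySem.Chars.isIn en.toList (PySem.Chars.strip ((PySem.List.pyGet? dat iln).getD "").toList) = true
        · simp [h0, h1, go_false_true]
        · simp [h0, h1, ih]

-- ===== VERDICT (by name: the statement is the Claim_ definition above) =====
theorem find_sect_spec : Claim_equal_find_sect := by
  intro txt_tag dat i_start i_end _ _
  unfold Spec_find_sect find_sect find_sect_alt
  exact go_false_false _ _ _ _
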